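-- pv_equiv track=rewrite | github.com/geonoxiy/Formative-Set-4 | Set 4.py | telephone_cipher
-- ===== SOURCE A (Python) =====
-- def telephone_cipher(message):
--
--     encoder_dict = {
--             " ":"0",
--             "A":"2",
--             "B":"22",
--             "C":"222",
--             "D":"3",
--             "E":"33",
--             "F":"333",
--             "G":"4",
--             "H":"44",
--             "I":"444",
--             "J":"5",
--             "K":"55",
--             "L":"555",
--             "M":"6",
--             "N":"66",
--             "O":"666",
--             "P":"7",
--             "Q":"77",
--             "R":"777",
--             "S":"7777",
--             "T":"8",
--             "U":"88",
--             "V":"888",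
--             "W":"9",
--             "X":"99",
--             "Y":"999",
--             "Z":"9999"
--         }
--
--     counter = 0
--     new_form = ""
--
--     while counter < len(message) - 1:
--         if encoder_dict[message[counter]][0] == encoder_dict[message[counter+1]][0]:
--             encoded_number = encoder_dict[message[counter]]
--             new_form += encoded_number + "_"
--
--         else:
--             encoded_number = encoder_dict[message[counter]]
--             new_form += encoded_number
--
--         counter += 1
--
--     new_form += encoder_dict[message[counter]]
--
--     return new_form
-- ===== SOURCE B (Python) =====
-- def telephone_cipher(message):
--
--     encoder_dict = {
--             " ":"0",
--             "A":"2", "B":"22", "C":"222",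
--             "D":"3", "E":"33", "F":"333",
--             "G":"4", "H":"44", "I":"444",
--             "J":"5", "K":"55", "L":"555",
--             "M":"6", "N":"66", "O":"666",
--             "P":"7", "Q":"77", "R":"777", "S":"7777",
--             "T":"8", "U":"88", "V":"888",
--             "W":"9", "X":"99", "Y":"999", "Z":"9999",
--         }
--
--     # Split the message into maximal runs of characters sharing a keypad digit
--     # (the first character of their code); join the codes of one run with an
--     # underscore and concatenate the runs.  A separator is needed exactly between two
--     # characters on the same key, i.e. exactly inside such a run.
--     pieces = []
--     i = 0
--     n = len(message)
--     while i < n: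
--         d = encoder_dict[message[i]][0]
--         j = i
--         while j < n and encoder_dict[message[j]][0] == d:
--             j += 1
--         pieces.append("_".join(encoder_dict[c] for c in message[i:j]))
--         i = j
--     return "".join(pieces)
-- ===== Notes on version B (the rewrite author's own statement) =====
-- stated objective: alternative
-- what changed: Instead of A's per-index look-ahead loop deciding a separator at each position, B splits the message into maximal runs of characters on the same keypad digit, joins each run's codes with an underscore and concatenates the runs.
import Mathlib
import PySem

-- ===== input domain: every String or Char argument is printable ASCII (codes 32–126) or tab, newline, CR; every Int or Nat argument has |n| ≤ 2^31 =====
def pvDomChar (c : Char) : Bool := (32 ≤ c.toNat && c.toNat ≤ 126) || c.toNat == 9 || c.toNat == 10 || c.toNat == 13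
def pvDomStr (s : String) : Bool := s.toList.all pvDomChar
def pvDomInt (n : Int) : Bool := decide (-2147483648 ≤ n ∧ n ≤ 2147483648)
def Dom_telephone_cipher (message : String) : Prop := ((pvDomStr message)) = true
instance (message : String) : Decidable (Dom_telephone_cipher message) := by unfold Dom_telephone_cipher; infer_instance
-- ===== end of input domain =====

-- B groups the message into maximal runs of characters on the same keypad digit and joins each run's
-- codes with '_', instead of A's per-index look-ahead loop; equivalence of the RETURN value on Pre_.

-- shared helper: the literal encoder_dict both Pythons contain
def encTable : PySem.Dict Char String := PySem.Dict.ofList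
  [(' ', "0"),
   ('A', "2"), ('B', "22"), ('C', "222"),
   ('D', "3"), ('E', "33"), ('F', "333"),
   ('G', "4"), ('H', "44"), ('I', "444"),
   ('J', "5"), ('K', "55"), ('L', "555"),
   ('M', "6"), ('N', "66"), ('O', "666"),
   ('P', "7"), ('Q', "77"), ('R', "777"), ('S', "7777"),
   ('T', "8"), ('U', "88"), ('V', "888"),
   ('W', "9"), ('X', "99"), ('Y', "999"), ('Z', "9999")]

-- encoder_dict[c]; KeyError (none) is excluded by Pre_, the default "" is never read there
def enc (c : Char) : String := (encTable.get? c).getD ""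

-- s[0] of a code string; codes are nonempty on Pre_, so head? is always some there
def firstDigit (s : String) : Option Char := s.toList.head?

-- ===== PORT A =====
-- the while loop, as recursion on the counter; message[i] via toList.getD (in range on Pre_)
def telephone_cipher_loop (chars : List Char) (counter : Nat) (new_form : String) : String :=
  if counter < chars.length - 1 then
    let e := enc (chars.getD counter ' ')
    let e2 := enc (chars.getD (counter + 1) ' ')
    if firstDigit e == firstDigit e2 then
      telephone_cipher_loop chars (counter + 1) (new_form ++ e ++ "_")
    else
      telephone_cipher_loop chars (counter + 1) (new_form ++ e)
  else
    new_form ++ enc (chars.getD counter ' ')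
termination_by chars.length - counter

def telephone_cipher (message : String) : String :=
  telephone_cipher_loop message.toList 0 ""

-- ===== PORT B =====
-- B's inner 'while j < n and digit(message[j]) == d' run scan: consume the maximal
-- prefix of characters whose code's first digit is d, return (run, remainder)
def takeRun (d : Option Char) : List Char → List Char × List Char
  | [] => ([], [])
  | c :: t =>
    if firstDigit (enc c) == d then
      let p := takeRun d t
      (c :: p.1, p.2)
    else ([], c :: t)

theorem takeRun_rest_length (d : Option Char) (l : List Char) :
    (takeRun d l).2.length ≤ l.length := by
  induction l with
  | nil => simp [takeRun]
  | cons c t ih =>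
    simp only [takeRun]
    split
    · simpa using Nat.le_succ_of_le ih
    · simp

-- B's outer while loop: split into maximal same-digit runs
def splitRuns : List Char → List (List Char)
  | [] => []
  | c :: t =>
    let p := takeRun (firstDigit (enc c)) t
    (c :: p.1) :: splitRuns p.2
termination_by l => l.length
decreasing_by
  simpa using Nat.lt_succ_of_le (takeRun_rest_length (firstDigit (enc c)) t)

-- hand port of "_".join(codes) (exact for any list of strings)
def ujoin : List String → String
  | [] => ""
  | [s] => s
  | s :: t => s ++ "_" ++ ujoin t

def telephone_cipher_alt (message : String) : String :=
  String.join ((splitRuns message.toList).map (fun run => ujoin (run.map enc)))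

-- ===== PRECONDITION & SPEC =====
-- Pre_ excludes the empty string (A raises IndexError) and any character outside
-- encoder_dict's keys, i.e. not the space or an uppercase ASCII letter (A raises KeyError).
def Pre_telephone_cipher (message : String) : Prop :=
  message.toList ≠ [] ∧
    message.toList.all (fun c => c == ' ' || (65 ≤ c.toNat && c.toNat ≤ 90)) = true
instance (message : String) : Decidable (Pre_telephone_cipher message) := by
  unfold Pre_telephone_cipher; infer_instance

def pvWitness_telephone_cipher : String := "HI"

def Spec_telephone_cipher (message : String) (out : String) : Prop := out = telephone_cipher_alt message
instance (message : String) (out : String) : Decidable (Spec_telephone_cipher message out) := by unfold Spec_telephone_cipher; infer_instance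

-- ===== CLAIM (what is proved, stated in full; the proofs are below) =====
def Claim_equal_telephone_cipher : Prop := ∀ (message : String), Dom_telephone_cipher message → Pre_telephone_cipher message → Spec_telephone_cipher message (telephone_cipher message)

-- ===== LEMMAS AND PROOFS =====

-- common spine: the intended output on a nonempty character list
def spine : List Char → String
  | [] => ""
  | [c] => enc c
  | a :: b :: t =>
    (if firstDigit (enc a) == firstDigit (enc b) then enc a ++ "_" else enc a) ++ spine (b :: t)

theorem join_foldl_acc (l : List String) (s : String) :
    l.foldl (· ++ ·) s = s ++ l.foldl (· ++ ·) "" := by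
  induction l generalizing s with
  | nil => simp
  | cons a t ih => simp only [List.foldl_cons]; rw [ih, ih ("" ++ a)]; simp [String.append_assoc]

theorem join_cons (a : String) (l : List String) :
    String.join (a :: l) = a ++ String.join l := by
  simp only [String.join, List.foldl_cons]; rw [join_foldl_acc]; simp

-- takeRun splits its input: run ++ rest = input
theorem takeRun_append (d : Option Char) (l : List Char) :
    (takeRun d l).1 ++ (takeRun d l).2 = l := by
  induction l with
  | nil => simp [takeRun]
  | cons c t ih =>
    simp only [takeRun]
    split
    · simpa using ih
    · simp

-- every character of the run has the scanned digit
theorem takeRun_run_digit (d : Option Char) (l : List Char) :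
    ∀ c ∈ (takeRun d l).1, firstDigit (enc c) = d := by
  induction l with
  | nil => simp [takeRun]
  | cons c t ih =>
    simp only [takeRun]
    split
    · next h =>
      intro x hx
      rcases List.mem_cons.mp hx with rfl | hx'
      · exact beq_iff_eq.mp h
      · exact ih x hx'
    · simp

-- the first character after the run (if any) has a different digit
theorem takeRun_rest_head (d : Option Char) (l : List Char) :
    ∀ x xs, (takeRun d l).2 = x :: xs → firstDigit (enc x) ≠ d := by
  induction l with
  | nil => simp [takeRun]
  | cons c t ih =>
    simp only [takeRun]
    split
    · exact ih
    · next h =>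
      intro x xs hx hcontra
      injection hx with h1 h2
      subst h1
      exact h (by simp [hcontra])

-- a maximal same-digit run contributes its codes joined by '_' to the spine
theorem spine_run (c : Char) (r rest : List Char)
    (hr : ∀ b ∈ r, firstDigit (enc b) = firstDigit (enc c))
    (hrest : ∀ x xs, rest = x :: xs → firstDigit (enc x) ≠ firstDigit (enc c)) :
    spine (c :: (r ++ rest)) = ujoin ((c :: r).map enc) ++ spine rest := by
  induction r generalizing c with
  | nil =>
    cases rest with
    | nil => simp [spine, ujoin]
    | cons x xs =>
      have hx : firstDigit (enc x) ≠ firstDigit (enc c) := hrest x xs rfl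
      have : ¬ (firstDigit (enc c) == firstDigit (enc x)) = true := by
        intro hb; exact hx (beq_iff_eq.mp hb).symm
      simp only [List.nil_append, List.map_cons, List.map_nil, ujoin, spine]
      rw [if_neg this]
  | cons b r' ih =>
    have hb : firstDigit (enc b) = firstDigit (enc c) := hr b (List.mem_cons_self ..)
    have hr' : ∀ x ∈ r', firstDigit (enc x) = firstDigit (enc b) := by
      intro x hx; rw [hb]; exact hr x (List.mem_cons_of_mem _ hx)
    have hrest' : ∀ x xs, rest = x :: xs → firstDigit (enc x) ≠ firstDigit (enc b) := by
      intro x xs hxs; rw [hb]; exact hrest x xs hxs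
    have hsp : spine (c :: b :: (r' ++ rest)) =
        (enc c ++ "_") ++ spine (b :: (r' ++ rest)) := by
      simp only [spine]
      rw [if_pos (beq_iff_eq.mpr hb.symm)]
    rw [List.cons_append, hsp, ih b hr' hrest']
    cases r' with
    | nil => simp [ujoin, String.append_assoc]
    | cons y ys => simp [ujoin, String.append_assoc]

-- B's grouping pass computes the spine (on every list; both are "" on [])
theorem alt_eq_spine_aux (n : Nat) : ∀ l : List Char, l.length ≤ n →
    String.join ((splitRuns l).map (fun run => ujoin (run.map enc))) = spine l := by
  induction n with
  | zero =>
    intro l hl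
    rw [List.length_eq_zero_iff.mp (Nat.le_zero.mp hl)]
    simp [splitRuns, spine, String.join]
  | succ n ih =>
    intro l hl
    cases l with
    | nil => simp [splitRuns, spine, String.join]
    | cons c t =>
      rw [splitRuns]
      simp only [List.map_cons, join_cons]
      set d := firstDigit (enc c) with hd
      have hrlen : (takeRun d t).2.length ≤ t.length := takeRun_rest_length d t
      have hIH := ih (takeRun d t).2 (by simp at hl; omega)
      rw [hIH]
      conv_rhs => rw [show (c :: t) = c :: ((takeRun d t).1 ++ (takeRun d t).2) from by
        rw [takeRun_append d t]]
      rw [spine_run c (takeRun d t).1 (takeRun d t).2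
            (takeRun_run_digit d t) (takeRun_rest_head d t), List.map_cons]

theorem alt_eq_spine (chars : List Char) :
    String.join ((splitRuns chars).map (fun run => ujoin (run.map enc))) = spine chars :=
  alt_eq_spine_aux chars.length chars le_rfl

-- A's loop computes the spine of the remaining suffix
theorem loop_eq_spine (chars : List Char) (k : Nat) :
    ∀ (counter : Nat) (acc : String), chars.length - counter = k →
      counter < chars.length →
      telephone_cipher_loop chars counter acc = acc ++ spine (chars.drop counter) := by
  induction k using Nat.strong_induction_on with
  | _ k ih =>
    intro counter acc hk h
    rw [telephone_cipher_loop]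
    by_cases hlt : counter < chars.length - 1
    · have h1 : counter + 1 < chars.length := by omega
      have hg : chars.getD counter ' ' = chars[counter] := List.getD_eq_getElem _ _ h
      have hg2 : chars.getD (counter + 1) ' ' = chars[counter + 1] := List.getD_eq_getElem _ _ h1
      have hrec := fun acc2 => ih (chars.length - (counter + 1)) (by omega) (counter + 1) acc2 rfl h1
      simp only [if_pos hlt, hg, hg2]
      rw [List.drop_eq_getElem_cons h, List.drop_eq_getElem_cons h1]
      rw [← List.drop_eq_getElem_cons h1]
      by_cases hfd : firstDigit (enc chars[counter]) == firstDigit (enc chars[counter + 1])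
      · rw [if_pos hfd, hrec _]
        simp only [spine, List.drop_eq_getElem_cons h1, hfd]
        rw [← List.drop_eq_getElem_cons h1]
        simp [String.append_assoc]
      · rw [if_neg hfd, hrec _]
        have hfd' : ¬ firstDigit (enc chars[counter]) = firstDigit (enc chars[counter + 1]) := by
          simpa using hfd
        simp only [spine, List.drop_eq_getElem_cons h1, beq_iff_eq, if_neg hfd']
        rw [← List.drop_eq_getElem_cons h1]
        simp [String.append_assoc]
    · have hc : counter = chars.length - 1 := by omega
      have hdrop1 : chars.drop (counter + 1) = [] := List.drop_eq_nil_of_le (by omega)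
      have hg : chars.getD counter ' ' = chars[counter] := List.getD_eq_getElem _ _ h
      rw [if_neg hlt, List.drop_eq_getElem_cons h, hdrop1, hg]
      rfl

-- ===== VERDICT (by name: the statement is the Claim_ definition above) =====
theorem telephone_cipher_spec : Claim_equal_telephone_cipher := by
  intro message _ hpre
  unfold Spec_telephone_cipher telephone_cipher telephone_cipher_alt
  have hne : message.toList ≠ [] := hpre.1
  have hlen : 0 < message.toList.length := List.length_pos_iff.mpr hne
  rw [loop_eq_spine _ _ _ _ rfl hlen, List.drop_zero, alt_eq_spine message.toList]
  simp
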